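-- pv_equiv track=rewrite | github.com/zariuq/CeTTa | scripts/sync_test_manifest.py | strip_make_comment
-- ===== SOURCE A (Python) =====
-- def strip_make_comment(line: str) -> str:
--     in_single = False
--     in_double = False
--     for idx, ch in enumerate(line):
--         if ch == "'" and not in_double:
--             in_single = not in_single
--         elif ch == '"' and not in_single:
--             in_double = not in_double
--         elif ch == "#" and not in_single and not in_double:
--             return line[:idx]
--     return line
-- ===== SOURCE B (Python) =====
-- def strip_make_comment(line: str) -> str:
--     i = 0
--     n = len(line)
--     while i < n:
--         ch = line[i]
--         if ch == "'":
--             j = line.find("'", i + 1)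
--             if j == -1:
--                 return line
--             i = j + 1
--         elif ch == '"':
--             j = line.find('"', i + 1)
--             if j == -1:
--                 return line
--             i = j + 1
--         elif ch == "#":
--             return line[:i]
--         else:
--             i += 1
--     return line
-- ===== Notes on version B (the rewrite author's own statement) =====
-- stated objective: alternative
-- what changed: Replaces A's per-character scan with two quote-state booleans by an index-driven while loop that jumps over each quoted span in one step using str.find, returning the whole line on an unterminated quote.
import Mathlib
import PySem

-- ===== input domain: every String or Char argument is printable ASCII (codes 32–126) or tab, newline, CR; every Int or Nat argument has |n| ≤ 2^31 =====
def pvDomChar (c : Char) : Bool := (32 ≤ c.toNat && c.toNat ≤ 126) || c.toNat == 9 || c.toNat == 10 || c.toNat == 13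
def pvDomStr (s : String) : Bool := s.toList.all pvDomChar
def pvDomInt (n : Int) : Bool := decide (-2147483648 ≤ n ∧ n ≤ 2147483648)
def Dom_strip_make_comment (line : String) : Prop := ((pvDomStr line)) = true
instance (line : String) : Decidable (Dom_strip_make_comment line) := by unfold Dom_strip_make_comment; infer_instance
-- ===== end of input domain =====

-- B replaces A's per-character quote-state toggling by an index loop that jumps over
-- quoted spans with find (objective: alternative decomposition, same cost).

-- ===== PORT A =====
-- A's for-loop over enumerate(line) with the two quote flags; 'some idx' = the early
-- 'return line[:idx]', 'none' = falling off the loop (return line).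
def stripGoA : List Char → Nat → Bool → Bool → Option Nat
  | [], _, _, _ => none
  | c :: rest, idx, s, d =>
    if c = '\'' && !d then stripGoA rest (idx + 1) (!s) d
    else if c = '"' && !s then stripGoA rest (idx + 1) s (!d)
    else if c = '#' && !s && !d then some idx
    else stripGoA rest (idx + 1) s d

def strip_make_comment (line : String) : String :=
  match stripGoA line.toList 0 false false with
  | some idx => String.ofList (line.toList.take idx)   -- line[:idx] with 0 ≤ idx ≤ len: exactly take
  | none => line

-- ===== PORT B =====
-- line.find(q, m): first index ≥ m holding q; none = Python's -1.
def stripFindFrom (l : List Char) (q : Char) (m : Nat) : Option Nat :=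
  ((l.drop m).findIdx? (fun c => c = q)).map (· + m)

-- termination helper for the while loop: find never returns an index below its start
theorem stripFindFrom_le {l : List Char} {q : Char} {m j : Nat}
    (h : stripFindFrom l q m = some j) : m ≤ j := by
  unfold stripFindFrom at h
  cases hf : (l.drop m).findIdx? (fun c => c = q) with
  | none => simp [hf] at h
  | some k => simp [hf] at h; omega

-- B's while loop: index i, skipping quoted spans via find.
def stripGoB (l : List Char) (i : Nat) : Option Nat :=
  if h : i < l.length then
    let c := l[i]
    if c = '\'' then
      match hj : stripFindFrom l '\'' (i + 1) with
      | none => none                         -- unterminated quote: return line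
      | some j => stripGoB l (j + 1)
    else if c = '"' then
      match hj : stripFindFrom l '"' (i + 1) with
      | none => none
      | some j => stripGoB l (j + 1)
    else if c = '#' then some i              -- return line[:i]
    else stripGoB l (i + 1)
  else none
termination_by l.length - i
decreasing_by
  · have := stripFindFrom_le hj; omega
  · have := stripFindFrom_le hj; omega
  · omega

def strip_make_comment_alt (line : String) : String :=
  match stripGoB line.toList 0 with
  | some i => String.ofList (line.toList.take i)
  | none => line

-- ===== PRECONDITION & SPEC =====
def Spec_strip_make_comment (line : String) (out : String) : Prop := out = strip_make_comment_alt line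
instance (line : String) (out : String) : Decidable (Spec_strip_make_comment line out) := by unfold Spec_strip_make_comment; infer_instance

-- ===== CLAIM (what is proved, stated in full; the proofs are below) =====
def Claim_equal_strip_make_comment : Prop := ∀ (line : String), Dom_strip_make_comment line → Spec_strip_make_comment line (strip_make_comment line)

-- ===== LEMMAS AND PROOFS =====

-- inside a single-quoted span A is inert until the closing quote
theorem stripGoA_single (rest : List Char) (idx : Nat) :
    stripGoA rest idx true false =
      match rest.findIdx? (fun c => c = '\'') with
      | none => none
      | some k => stripGoA (rest.drop (k + 1)) (idx + k + 1) false false := by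
  induction rest generalizing idx with
  | nil => simp [stripGoA]
  | cons c rest ih =>
    by_cases hc : c = '\''
    · subst hc
      simp [stripGoA, List.findIdx?_cons]
    · rw [List.findIdx?_cons]
      simp only [decide_eq_true_eq, hc, if_false]
      have hA : stripGoA (c :: rest) idx true false = stripGoA rest (idx + 1) true false := by
        simp [stripGoA, hc]
      rw [hA, ih]
      cases hf : rest.findIdx? (fun c => c = '\'') with
      | none => simp [hf]
      | some k =>
        simp only [Option.map_some]
        have : idx + 1 + k + 1 = idx + (k + 1) + 1 := by omega
        simp [this]

-- inside a double-quoted span A is inert until the closing quote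
theorem stripGoA_double (rest : List Char) (idx : Nat) :
    stripGoA rest idx false true =
      match rest.findIdx? (fun c => c = '"') with
      | none => none
      | some k => stripGoA (rest.drop (k + 1)) (idx + k + 1) false false := by
  induction rest generalizing idx with
  | nil => simp [stripGoA]
  | cons c rest ih =>
    by_cases hc : c = '"'
    · subst hc
      simp [stripGoA, List.findIdx?_cons]
    · rw [List.findIdx?_cons]
      simp only [decide_eq_true_eq, hc, if_false]
      have hA : stripGoA (c :: rest) idx false true = stripGoA rest (idx + 1) false true := by
        by_cases h1 : c = '\'' <;> simp [stripGoA, hc, h1]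
      rw [hA, ih]
      cases hf : rest.findIdx? (fun c => c = '"') with
      | none => simp [hf]
      | some k =>
        simp only [Option.map_some]
        have : idx + 1 + k + 1 = idx + (k + 1) + 1 := by omega
        simp [this]

theorem stripGo_eq (n : Nat) : ∀ (l : List Char) (i : Nat), l.length ≤ i + n →
    stripGoA (l.drop i) i false false = stripGoB l i := by
  induction n with
  | zero =>
    intro l i hn
    have hd : l.drop i = [] := List.drop_eq_nil_of_le (by omega)
    rw [stripGoB]
    simp [hd, stripGoA, show ¬ i < l.length by omega]
  | succ n ih =>
    intro l i hn
    by_cases h : i < l.length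
    · have hd : l.drop i = l[i] :: l.drop (i + 1) := List.drop_eq_getElem_cons h
      rw [stripGoB]
      simp only [h, dif_pos]
      by_cases h1 : l[i] = '\''
      · have hA : stripGoA (l.drop i) i false false =
            stripGoA (l.drop (i + 1)) (i + 1) true false := by
          rw [hd]; simp [stripGoA, h1]
        rw [hA, stripGoA_single]
        simp only [h1, if_pos]
        unfold stripFindFrom
        cases hf : (l.drop (i + 1)).findIdx? (fun c => c = '\'') with
        | none => simp [hf]
        | some k =>
          simp only [hf, Option.map_some]
          rw [List.drop_drop]
          have hk : i + 1 + k + 1 = k + (i + 1) + 1 := by omega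
          have hk2 : i + 1 + (k + 1) = k + (i + 1) + 1 := by omega
          rw [hk, hk2, ih l (k + (i + 1) + 1) (by omega)]
      · by_cases h2 : l[i] = '"'
        · have hA : stripGoA (l.drop i) i false false =
              stripGoA (l.drop (i + 1)) (i + 1) false true := by
            rw [hd]; simp [stripGoA, h1, h2]
          rw [hA, stripGoA_double]
          simp [h1, h2]
          unfold stripFindFrom
          cases hf : (l.drop (i + 1)).findIdx? (fun c => c = '"') with
          | none => simp [hf, h1]
          | some k =>
            simp only [Option.map_some]
            rw [show i + 1 + (k + 1) = k + (i + 1) + 1 from by omega,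
                show i + 1 + k + 1 = k + (i + 1) + 1 from by omega,
                ih l (k + (i + 1) + 1) (by omega)]
        · by_cases h3 : l[i] = '#'
          · rw [hd]; simp [stripGoA, h1, h2, h3]
          · have hA : stripGoA (l.drop i) i false false =
                stripGoA (l.drop (i + 1)) (i + 1) false false := by
              rw [hd]; simp [stripGoA, h1, h2, h3]
            rw [hA, ih l (i + 1) (by omega)]
            simp [h1, h2, h3]
    · have hd : l.drop i = [] := List.drop_eq_nil_of_le (by omega)
      rw [stripGoB]
      simp [hd, stripGoA, h]

-- ===== VERDICT (by name: the statement is the Claim_ definition above) =====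
theorem strip_make_comment_spec : Claim_equal_strip_make_comment := by
  intro line _
  unfold Spec_strip_make_comment strip_make_comment strip_make_comment_alt
  have h := stripGo_eq line.toList.length line.toList 0 (by omega)
  rw [List.drop_zero] at h
  rw [h]
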